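-- pv_equiv track=rewrite | github.com/martinjingyu/Multi-Turn-Jailbreaker | model/Evaluator/local.py | convert_messages_to_vicuna_prompts
-- ===== SOURCE A (Python) =====
-- def convert_messages_to_vicuna_prompts(message_batch: list[list[dict]]) -> list[str]:
--     prompts = []
--     for messages in message_batch:
--         prompt = ""
--         system_msg = "You are a helpful assistant."
--         idx = 0
--
--         if messages and messages[0]["role"] == "system":
--             system_msg = messages[0]["content"]
--             idx = 1
--
--         prompt += "<s>[INST] <<SYS>>\n" + system_msg + "\n<</SYS>>\n\n"
--
--
--         turn = 0
--         while idx < len(messages):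
--             msg = messages[idx]
--             if msg["role"] == "user":
--                 user_input = msg["content"]
--                 next_msg = messages[idx + 1] if idx + 1 < len(messages) else None
--
--                 if next_msg and next_msg["role"] == "assistant":
--                     assistant_output = next_msg["content"]
--                     prompt += f"{user_input} [/INST] {assistant_output}</s><s>[INST] "
--                     idx += 2
--                 else:
--                     prompt += f"{user_input} [/INST]"
--                     idx += 1
--             else:
--                 idx += 1
--
--         prompts.append(prompt)
--     return prompts
-- ===== SOURCE B (Python) =====
-- def convert_messages_to_vicuna_prompts(message_batch: list[list[dict]]) -> list[str]:
--     return ["".join(_vicuna_parts(messages)) for messages in message_batch]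
--
--
-- def _vicuna_parts(messages):
--     """Yield the prompt as a list of segments: a header, then one segment per kept message."""
--     if messages and messages[0]["role"] == "system":
--         yield "<s>[INST] <<SYS>>\n" + messages[0]["content"] + "\n<</SYS>>\n\n"
--         body = messages[1:]
--     else:
--         yield "<s>[INST] <<SYS>>\nYou are a helpful assistant.\n<</SYS>>\n\n"
--         body = messages
--     prev_user = False
--     for msg in body:
--         role = msg["role"]
--         if role == "user":
--             yield f"{msg['content']} [/INST]"
--             prev_user = True
--         else:
--             if role == "assistant" and prev_user:
--                 yield f" {msg['content']}</s><s>[INST] "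
--             prev_user = False
-- ===== Notes on version B (the rewrite author's own statement) =====
-- stated objective: alternative
-- what changed: Instead of A's index-stepping while loop with messages[idx+1] lookahead that concatenates onto a growing prompt string, B generates the prompt as a lazy sequence of segments (header segment plus one segment per kept message, decided by a prev_user flag) and joins them with ''.join.
import Mathlib
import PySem

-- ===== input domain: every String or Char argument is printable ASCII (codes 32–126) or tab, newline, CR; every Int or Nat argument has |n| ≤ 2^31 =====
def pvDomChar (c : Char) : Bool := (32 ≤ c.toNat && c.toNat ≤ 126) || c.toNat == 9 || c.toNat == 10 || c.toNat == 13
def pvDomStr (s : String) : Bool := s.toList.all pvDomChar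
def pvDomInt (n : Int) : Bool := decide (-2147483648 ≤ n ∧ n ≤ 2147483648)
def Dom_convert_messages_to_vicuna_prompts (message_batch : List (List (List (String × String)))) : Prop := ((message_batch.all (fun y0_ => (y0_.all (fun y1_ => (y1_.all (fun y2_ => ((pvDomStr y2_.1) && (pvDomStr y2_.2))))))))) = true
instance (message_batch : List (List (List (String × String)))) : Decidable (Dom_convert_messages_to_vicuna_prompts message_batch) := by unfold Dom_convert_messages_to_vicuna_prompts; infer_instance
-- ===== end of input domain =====

-- B builds each prompt as a list of segments (header plus one segment per kept message, chosen by
-- a prev_user flag) and joins them, instead of A's index-stepping lookahead loop that concatenates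
-- onto a growing string (alternative decomposition; same return values).

-- msg["key"]: dict lookup (first match).  Pre_ guarantees the key is present wherever the
-- Python programs access it, so the "" default is never observed inside Pre_.
def pvGet (m : List (String × String)) (k : String) : String :=
  (PySem.Dict.mk m).getD k ""

-- ===== PORT A =====
-- the `while idx < len(messages)` loop of A, on the suffix `messages[idx:]`
def pvLoopA : List (List (String × String)) → String → String
  | [], prompt => prompt
  | msg :: rest, prompt =>
    if pvGet msg "role" == "user" then
      let user_input := pvGet msg "content"
      match rest with
      | next :: rest2 =>
        if pvGet next "role" == "assistant" then
          pvLoopA rest2 (prompt ++ user_input ++ " [/INST] " ++ pvGet next "content" ++ "</s><s>[INST] ")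
        else
          pvLoopA (next :: rest2) (prompt ++ user_input ++ " [/INST]")
      | [] => pvLoopA [] (prompt ++ user_input ++ " [/INST]")
    else
      pvLoopA rest prompt

def pvPromptA (messages : List (List (String × String))) : String :=
  let p : String × List (List (String × String)) :=
    match messages with
    | m0 :: rest =>
      if pvGet m0 "role" == "system" then (pvGet m0 "content", rest)
      else ("You are a helpful assistant.", m0 :: rest)
    | [] => ("You are a helpful assistant.", [])
  pvLoopA p.2 ("<s>[INST] <<SYS>>\n" ++ p.1 ++ "\n<</SYS>>\n\n")

def convert_messages_to_vicuna_prompts (message_batch : List (List (List (String × String)))) : List String :=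
  message_batch.foldl (fun prompts messages => prompts ++ [pvPromptA messages]) []

-- ===== PORT B =====
-- B's generator: one output segment per kept message, driven by the prev_user flag
def pvSegs : List (List (String × String)) → Bool → List String
  | [], _ => []
  | msg :: rest, prev_user =>
    let role := pvGet msg "role"
    if role == "user" then
      (pvGet msg "content" ++ " [/INST]") :: pvSegs rest true
    else if role == "assistant" && prev_user then
      (" " ++ pvGet msg "content" ++ "</s><s>[INST] ") :: pvSegs rest false
    else
      pvSegs rest false

-- the _vicuna_parts generator: header segment, then the per-message segments of the body
def pvVicunaParts (messages : List (List (String × String))) : List String :=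
  match messages with
  | m0 :: rest =>
    if pvGet m0 "role" == "system" then
      ("<s>[INST] <<SYS>>\n" ++ pvGet m0 "content" ++ "\n<</SYS>>\n\n") :: pvSegs rest false
    else
      "<s>[INST] <<SYS>>\nYou are a helpful assistant.\n<</SYS>>\n\n" :: pvSegs (m0 :: rest) false
  | [] => ["<s>[INST] <<SYS>>\nYou are a helpful assistant.\n<</SYS>>\n\n"]

def convert_messages_to_vicuna_prompts_alt (message_batch : List (List (List (String × String)))) : List String :=
  message_batch.map (fun messages => String.join (pvVicunaParts messages))

-- ===== PRECONDITION & SPEC =====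
-- Pre_ excludes exactly the inputs on which the Python A raises KeyError: some message has no
-- "role" key, or a message whose "content" the code reads (a leading system message, any user
-- message, an assistant message directly after a user message) has no "content" key.
def Pre_convert_messages_to_vicuna_prompts (message_batch : List (List (List (String × String)))) : Prop :=
  ∀ messages ∈ message_batch,
    (∀ m ∈ messages, ((PySem.Dict.mk m).get? "role").isSome = true) ∧
    (∀ m0 ∈ messages.take 1, (PySem.Dict.mk m0).get? "role" = some "system" →
        ((PySem.Dict.mk m0).get? "content").isSome = true) ∧
    (∀ m ∈ messages, (PySem.Dict.mk m).get? "role" = some "user" →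
        ((PySem.Dict.mk m).get? "content").isSome = true) ∧
    (∀ p ∈ messages.zip messages.tail, (PySem.Dict.mk p.1).get? "role" = some "user" →
        (PySem.Dict.mk p.2).get? "role" = some "assistant" →
        ((PySem.Dict.mk p.2).get? "content").isSome = true)
instance (message_batch : List (List (List (String × String)))) : Decidable (Pre_convert_messages_to_vicuna_prompts message_batch) := by unfold Pre_convert_messages_to_vicuna_prompts; infer_instance

def pvWitness_convert_messages_to_vicuna_prompts : (List (List (List (String × String)))) :=
  [[[("role", "system"), ("content", "Be terse.")],
    [("role", "user"), ("content", "hi")],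
    [("role", "assistant"), ("content", "hello")],
    [("role", "user"), ("content", "bye")]]]

def Spec_convert_messages_to_vicuna_prompts (message_batch : List (List (List (String × String)))) (out : List String) : Prop := out = convert_messages_to_vicuna_prompts_alt message_batch
instance (message_batch : List (List (List (String × String)))) (out : List String) : Decidable (Spec_convert_messages_to_vicuna_prompts message_batch out) := by unfold Spec_convert_messages_to_vicuna_prompts; infer_instance

-- ===== CLAIM (what is proved, stated in full; the proofs are below) =====
def Claim_equal_convert_messages_to_vicuna_prompts : Prop := ∀ (message_batch : List (List (List (String × String)))), Dom_convert_messages_to_vicuna_prompts message_batch → Pre_convert_messages_to_vicuna_prompts message_batch → Spec_convert_messages_to_vicuna_prompts message_batch (convert_messages_to_vicuna_prompts message_batch)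

-- ===== LEMMAS AND PROOFS =====

theorem pvFoldl_append (l : List String) (x y : String) :
    List.foldl (fun r s => r ++ s) (x ++ y) l = x ++ List.foldl (fun r s => r ++ s) y l := by
  induction l generalizing y with
  | nil => rfl
  | cons b t ih => simp only [List.foldl, String.append_assoc, ih]

theorem pvJoin_cons (a : String) (l : List String) :
    String.join (a :: l) = a ++ String.join l := by
  simp only [String.join, List.foldl]
  simpa using pvFoldl_append l a ""

-- the prev_user flag only matters when the next message is an assistant message
theorem pvSegs_prev_irrel (msg : List (String × String)) (rest : List (List (String × String)))
    (h : (pvGet msg "role" == "assistant") = false) :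
    pvSegs (msg :: rest) true = pvSegs (msg :: rest) false := by
  simp only [pvSegs, h, Bool.and_false, Bool.and_true]

-- A's accumulator loop computes the accumulator followed by the join of B's segments
theorem pvLoopA_eq_join (msgs : List (List (String × String))) (prompt : String) :
    pvLoopA msgs prompt = prompt ++ String.join (pvSegs msgs false) := by
  induction msgs, prompt using pvLoopA.induct with
  | case1 prompt' => simp [pvLoopA, pvSegs, String.join]
  | case2 msg prompt' hu u next rest2 ha ih =>
    have ha' : pvGet next "role" = "assistant" := by simpa using ha
    rw [pvLoopA]
    simp only [hu, ha, if_true]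
    rw [pvSegs]
    simp only [hu, if_true]
    rw [pvSegs]
    simp only [ha', Bool.and_true]
    rw [if_neg (by decide), if_pos (by decide)]
    rw [pvJoin_cons, pvJoin_cons, ih]
    simp only [String.append_assoc]
    rfl
  | case3 msg prompt' hu u next rest2 ha ih =>
    simp only [Bool.not_eq_true] at ha
    rw [pvLoopA]
    simp only [hu, ha, if_true, Bool.false_eq_true, if_false]
    rw [pvSegs]
    simp only [hu, if_true]
    rw [pvSegs_prev_irrel _ _ ha, pvJoin_cons, ih]
    simp only [String.append_assoc]
    rfl
  | case4 msg prompt' hu u =>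
    rw [pvLoopA]
    simp only [hu, if_true]
    rw [pvSegs]
    simp only [hu, if_true]
    simp [pvLoopA, pvSegs, String.join, String.append_assoc]
  | case5 msg rest prompt' hu ih =>
    simp only [Bool.not_eq_true] at hu
    rw [pvLoopA, pvSegs]
    simp only [hu, Bool.false_eq_true, if_false, Bool.and_false]
    exact ih

theorem pvPromptA_eq (messages : List (List (String × String))) :
    pvPromptA messages = String.join (pvVicunaParts messages) := by
  unfold pvPromptA pvVicunaParts
  cases messages with
  | nil => simp [pvLoopA, String.join]
  | cons m0 rest =>
    by_cases h : (pvGet m0 "role" == "system") = true <;>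
      simp only [h, if_true, Bool.false_eq_true, if_false] <;>
      rw [pvJoin_cons, pvLoopA_eq_join] <;> rfl

-- ===== VERDICT (by name: the statement is the Claim_ definition above) =====
theorem convert_messages_to_vicuna_prompts_spec : Claim_equal_convert_messages_to_vicuna_prompts := by
  intro message_batch _ _
  unfold Spec_convert_messages_to_vicuna_prompts
  unfold convert_messages_to_vicuna_prompts convert_messages_to_vicuna_prompts_alt
  rw [PySem.List.foldl_append_singleton_eq_map]
  exact List.map_congr_left fun m _ => pvPromptA_eq m
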